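-- pv_equiv track=rewrite | github.com/DanielFalcony/GB_Python | GB_new_lessons_home_works/home_works_11_31-Task22.py | calc_summ
-- ===== SOURCE A (Python) =====
-- def calc_summ(my_list):
--     count = 0
--     result = 0
--     for i in my_list:
--         count += 1
--         if count % 2 != 0:
--             result += i
--
--     return f'Сумма чисел на нечетных позициях списка {my_list} = {result}'
-- ===== SOURCE B (Python) =====
-- def calc_summ(my_list):
--     result = sum(my_list[::2])
--     return f'Сумма чисел на нечетных позициях списка {my_list} = {result}'
-- ===== Notes on version B (the rewrite author's own statement) =====
-- stated objective: idiomatic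
-- what changed: Replaces the counter-and-parity-branch accumulator loop with strided slicing: the odd-position elements are selected in one stride-2 slice and summed, with no per-element parity test.
import Mathlib
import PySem

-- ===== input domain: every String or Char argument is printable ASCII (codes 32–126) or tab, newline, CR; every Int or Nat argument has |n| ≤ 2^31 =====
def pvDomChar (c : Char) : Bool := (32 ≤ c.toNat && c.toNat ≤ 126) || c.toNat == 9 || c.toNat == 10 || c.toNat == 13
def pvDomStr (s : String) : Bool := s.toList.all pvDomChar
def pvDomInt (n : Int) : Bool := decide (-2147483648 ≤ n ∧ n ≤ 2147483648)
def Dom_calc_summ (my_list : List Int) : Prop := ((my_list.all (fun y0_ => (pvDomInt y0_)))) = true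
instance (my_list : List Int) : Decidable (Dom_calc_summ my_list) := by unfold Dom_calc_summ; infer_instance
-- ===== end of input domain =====

-- B replaces A's counter-and-parity-branch loop with a stride-2 slice summed once (idiomatic; same O(n) cost).

-- Python's repr of a list of ints, as interpolated by the f-string (shared by both ports).
def pyIntListRepr (xs : List Int) : String :=
  "[" ++ PySem.Str.join ", " (xs.map PySem.Int.toStr) ++ "]"

-- ===== PORT A =====
-- A's for-loop over the list carrying (count, result).
def calcLoopA : List Int → Int × Int → Int × Int
  | [], p => p
  | i :: t, p =>
    calcLoopA t (p.1 + 1, if PySem.Int.mod (p.1 + 1) 2 ≠ 0 then p.2 + i else p.2)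

def calc_summ (my_list : List Int) : String :=
  let st := calcLoopA my_list (0, 0)
  "Сумма чисел на нечетных позициях списка " ++ pyIntListRepr my_list ++ " = " ++ PySem.Int.toStr st.2

-- ===== PORT B =====
-- my_list[::2] is slice? with step 2; step 2 ≠ 0, so getD [] never takes its default.
def calc_summ_alt (my_list : List Int) : String :=
  let result := ((PySem.List.slice? my_list none none 2).getD []).sum
  "Сумма чисел на нечетных позициях списка " ++ pyIntListRepr my_list ++ " = " ++ PySem.Int.toStr result

-- ===== PRECONDITION & SPEC =====
def Spec_calc_summ (my_list : List Int) (out : String) : Prop := out = calc_summ_alt my_list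
instance (my_list : List Int) (out : String) : Decidable (Spec_calc_summ my_list out) := by unfold Spec_calc_summ; infer_instance

-- ===== CLAIM (what is proved, stated in full; the proofs are below) =====
def Claim_equal_calc_summ : Prop := ∀ (my_list : List Int), Dom_calc_summ my_list → Spec_calc_summ my_list (calc_summ my_list)

-- ===== LEMMAS AND PROOFS =====

/-- Elements at even 0-based indices (odd 1-based positions); `b` = "take the next element". -/
def sel : Bool → List Int → List Int
  | _, [] => []
  | true, a :: xs => a :: sel false xs
  | false, _ :: xs => sel true xs

lemma loopA_sel (xs : List Int) : ∀ (c r : Int),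
    (calcLoopA xs (c, r)).2 = r + (sel (c % 2 == 0) xs).sum := by
  induction xs with
  | nil => intro c r; simp [calcLoopA, sel]
  | cons a t ih =>
    intro c r
    have hm : PySem.Int.mod (c + 1) 2 = (c + 1) % 2 := by
      simp [PySem.Int.mod, Int.fmod_eq_emod]
    rw [calcLoopA]
    simp only [hm]
    by_cases hc : c % 2 = 0
    · have h1 : (c + 1) % 2 = 1 := by omega
      rw [if_pos (by omega), ih, h1]
      simp [hc, sel]
      ring
    · have h0 : (c + 1) % 2 = 0 := by omega
      rw [if_neg (by omega), ih, h0]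
      have hc1 : (c % 2 == 0) = false := by simp [hc]
      simp [hc1, sel]

lemma filterMap_sel : ∀ (n : Nat) (xs : List Int), xs.length ≤ n →
    List.filterMap (fun k => xs[2 * k]?) (List.range ((xs.length + 1) / 2)) = sel true xs := by
  intro n
  induction n with
  | zero =>
    intro xs h
    have : xs = [] := List.eq_nil_of_length_eq_zero (Nat.le_zero.mp h)
    simp [this, sel]
  | succ n ih =>
    intro xs h
    match xs with
    | [] => simp [sel]
    | [a] => simp [sel, List.range_one]
    | a :: b :: t =>
      have hdiv : ((a :: b :: t).length + 1) / 2 = (t.length + 1) / 2 + 1 := by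
        simp; omega
      rw [hdiv, List.range_succ_eq_map, List.filterMap_cons]
      have hget0 : (a :: b :: t)[2 * 0]? = some a := by simp
      rw [hget0]
      have hmap : List.filterMap (fun k => (a :: b :: t)[2 * k]?)
            (List.map Nat.succ (List.range ((t.length + 1) / 2)))
          = List.filterMap (fun k => t[2 * k]?) (List.range ((t.length + 1) / 2)) := by
        rw [List.filterMap_map]
        apply List.filterMap_congr
        intro k _
        have h2 : 2 * Nat.succ k = 2 * k + 2 := by omega
        simp [Function.comp, h2]
      have ht : t.length ≤ n := by simp at h; omega
      rw [hmap, ih t ht]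
      simp [sel]

lemma slice_two_eq_sel (xs : List Int) :
    (PySem.List.slice? xs none none 2).getD [] = sel true xs := by
  have hs : PySem.List.slice? xs none none 2 =
      some (List.filterMap (fun k => xs[2 * k]?) (List.range ((xs.length + 1) / 2))) := by
    unfold PySem.List.slice? PySem.List.sliceIndices
    norm_num
    have hc : (if 0 < xs.length then (((xs.length : Int) + 2 - 1) / 2).toNat else 0)
        = (xs.length + 1) / 2 := by
      split <;> omega
    rw [hc]
    apply List.filterMap_congr
    intro x _
    have h : ((2 * (x : Int)).toNat) = 2 * x := by omega
    rw [h]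
  rw [hs]
  simp [filterMap_sel xs.length xs le_rfl]

-- ===== VERDICT (by name: the statement is the Claim_ definition above) =====
theorem calc_summ_spec : Claim_equal_calc_summ := by
  intro my_list _
  unfold Spec_calc_summ calc_summ calc_summ_alt
  simp only [slice_two_eq_sel, loopA_sel]
  norm_num
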